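-- pv_equiv track=rewrite | github.com/ian-iania/totality-precatorios | main_v3_parallel.py | divide_pages_into_ranges
-- ===== SOURCE A (Python) =====
-- from typing import List, Tuple
--
-- def divide_pages_into_ranges(total_pages: int, num_processes: int) -> List[Tuple[int, int]]:
--     """
--     Divide total pages into ranges for parallel processing
--
--     Args:
--         total_pages: Total number of pages (e.g., 2984 for Estado RJ)
--         num_processes: Number of parallel processes (e.g., 2, 4)
--
--     Returns:
--         List of (start_page, end_page) tuples
--
--     Example:
--         >>> divide_pages_into_ranges(2984, 4)
--         [(1, 746), (747, 1492), (1493, 2238), (2239, 2984)]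
--     """
--     pages_per_process = total_pages // num_processes
--     remainder = total_pages % num_processes
--
--     ranges = []
--     current_page = 1
--
--     for i in range(num_processes):
--         # Distribute remainder across first processes
--         extra = 1 if i < remainder else 0
--         pages_in_range = pages_per_process + extra
--
--         start_page = current_page
--         end_page = current_page + pages_in_range - 1
--
--         ranges.append((start_page, end_page))
--         current_page = end_page + 1
--
--     return ranges
-- ===== SOURCE B (Python) =====
-- def divide_pages_into_ranges(total_pages, num_processes):
--     q, r = divmod(total_pages, num_processes)
--     return [(1 + i * q + min(i, r), (i + 1) * q + min(i + 1, r))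
--             for i in range(num_processes)]
-- ===== Notes on version B (the rewrite author's own statement) =====
-- stated objective: alternative
-- what changed: Replaced A's accumulator-carrying loop (running current_page updated per iteration) by a per-index closed form: each (start, end) tuple is computed independently as 1 + i*q + min(i, r) etc., with no running state.
import Mathlib
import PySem

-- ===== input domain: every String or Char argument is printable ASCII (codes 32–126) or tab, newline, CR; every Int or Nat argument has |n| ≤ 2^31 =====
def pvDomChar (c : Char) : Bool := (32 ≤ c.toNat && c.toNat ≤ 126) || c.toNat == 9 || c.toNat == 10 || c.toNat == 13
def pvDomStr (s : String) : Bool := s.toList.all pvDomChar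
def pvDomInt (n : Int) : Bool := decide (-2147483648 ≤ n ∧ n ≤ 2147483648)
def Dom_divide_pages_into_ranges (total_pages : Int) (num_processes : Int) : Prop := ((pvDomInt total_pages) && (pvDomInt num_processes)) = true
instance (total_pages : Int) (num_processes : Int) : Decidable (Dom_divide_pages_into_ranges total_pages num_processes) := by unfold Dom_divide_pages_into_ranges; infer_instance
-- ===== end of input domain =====

-- B replaces A's accumulator-carrying loop by an index-only closed form for each tuple (alternative decomposition, same cost).

-- ===== PORT A =====
-- transliteration of A: accumulator loop over range(num_processes), state (ranges, current_page)
def divide_pages_into_ranges (total_pages : Int) (num_processes : Int) : List (Int × Int) :=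
  let pages_per_process := PySem.Int.floordiv total_pages num_processes
  let remainder := PySem.Int.mod total_pages num_processes
  let st := (PySem.List.pyRange 0 num_processes 1).foldl
    (fun (st : List (Int × Int) × Int) i =>
      let extra : Int := if i < remainder then 1 else 0
      let pages_in_range := pages_per_process + extra
      let start_page := st.2
      let end_page := st.2 + pages_in_range - 1
      (st.1 ++ [(start_page, end_page)], end_page + 1))
    ([], 1)
  st.1

-- ===== PORT B =====
-- transliteration of B: per-index closed form, no running accumulator
def divide_pages_into_ranges_alt (total_pages : Int) (num_processes : Int) : List (Int × Int) :=
  let q := PySem.Int.floordiv total_pages num_processes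
  let r := PySem.Int.mod total_pages num_processes
  (PySem.List.pyRange 0 num_processes 1).map
    (fun i => (1 + i * q + min i r, (i + 1) * q + min (i + 1) r))

-- ===== PRECONDITION & SPEC =====
-- Pre_ excludes exactly num_processes = 0, where Python A raises ZeroDivisionError.
def Pre_divide_pages_into_ranges (total_pages : Int) (num_processes : Int) : Prop := num_processes ≠ 0
instance (total_pages : Int) (num_processes : Int) : Decidable (Pre_divide_pages_into_ranges total_pages num_processes) := by unfold Pre_divide_pages_into_ranges; infer_instance
def pvWitness_divide_pages_into_ranges : Int × Int := (2984, 4)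

def Spec_divide_pages_into_ranges (total_pages : Int) (num_processes : Int) (out : List (Int × Int)) : Prop := out = divide_pages_into_ranges_alt total_pages num_processes
instance (total_pages : Int) (num_processes : Int) (out : List (Int × Int)) : Decidable (Spec_divide_pages_into_ranges total_pages num_processes out) := by unfold Spec_divide_pages_into_ranges; infer_instance

-- ===== CLAIM (what is proved, stated in full; the proofs are below) =====
def Claim_equal_divide_pages_into_ranges : Prop := ∀ (total_pages : Int) (num_processes : Int), Dom_divide_pages_into_ranges total_pages num_processes → Pre_divide_pages_into_ranges total_pages num_processes → Spec_divide_pages_into_ranges total_pages num_processes (divide_pages_into_ranges total_pages num_processes)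

-- ===== LEMMAS AND PROOFS =====

-- loop invariant: after processing indices 0..m-1 the accumulator is B's map and
-- current_page is the closed form 1 + m*q + min m r
theorem pv_loop_inv (q r : Int) (hr : 0 ≤ r) (m : Nat) :
    (PySem.List.pyRange 0 m 1).foldl
      (fun (st : List (Int × Int) × Int) i =>
        (st.1 ++ [(st.2, st.2 + (q + (if i < r then 1 else 0)) - 1)],
         st.2 + (q + (if i < r then 1 else 0)) - 1 + 1))
      ([], 1)
    = ((PySem.List.pyRange 0 m 1).map
        (fun i => (1 + i * q + min i r, (i + 1) * q + min (i + 1) r)),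
       1 + m * q + min (m : Int) r) := by
  induction m with
  | zero =>
      have h0 : min (0:Int) r = 0 := by omega
      simp [PySem.List.pyRange_one_eq_nil (le_refl (0:Int)), h0]
  | succ n ih =>
      have h : PySem.List.pyRange 0 ((n:Int)+1) 1
          = PySem.List.pyRange 0 (n:Int) 1 ++ [(n:Int)] :=
        PySem.List.pyRange_one_succ_right (by positivity)
      have hmin : min ((n:Int)+1) r = min (n:Int) r + (if (n:Int) < r then 1 else 0) := by
        by_cases hc : (n:Int) < r <;> simp [hc] <;> omega
      push_cast
      rw [h, List.foldl_append, List.map_append, ih]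
      simp only [List.foldl_cons, List.foldl_nil, List.map_cons, List.map_nil,
        Prod.mk.injEq, List.append_right_inj, List.cons.injEq, and_true]
      rw [hmin]
      refine ⟨⟨trivial, by ring⟩, by ring⟩

-- ===== VERDICT (by name: the statement is the Claim_ definition above) =====
theorem divide_pages_into_ranges_spec : Claim_equal_divide_pages_into_ranges := by
  intro t n _ hn
  replace hn : n ≠ 0 := hn
  unfold Spec_divide_pages_into_ranges divide_pages_into_ranges divide_pages_into_ranges_alt
  by_cases hpos : 0 < n
  · have hr : 0 ≤ PySem.Int.mod t n := PySem.Int.mod_nonneg t hpos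
    have hnn : n = ((n.toNat : Nat) : Int) := by omega
    rw [hnn]
    have := pv_loop_inv (PySem.Int.floordiv t n) (PySem.Int.mod t n) hr n.toNat
    simp only []
    -- rewrite the foldl body to the lemma's shape and conclude
    rw [show
      (fun (st : List (Int × Int) × Int) (i : Int) =>
        (st.1 ++ [(st.2, st.2 + (PySem.Int.floordiv t ((n.toNat : Nat) : Int) + (if i < PySem.Int.mod t ((n.toNat : Nat) : Int) then 1 else 0)) - 1)],
         st.2 + (PySem.Int.floordiv t ((n.toNat : Nat) : Int) + (if i < PySem.Int.mod t ((n.toNat : Nat) : Int) then 1 else 0)) - 1 + 1))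
      = (fun (st : List (Int × Int) × Int) (i : Int) =>
        (st.1 ++ [(st.2, st.2 + (PySem.Int.floordiv t n + (if i < PySem.Int.mod t n then 1 else 0)) - 1)],
         st.2 + (PySem.Int.floordiv t n + (if i < PySem.Int.mod t n then 1 else 0)) - 1 + 1))
      from by rw [← hnn]]
    rw [← hnn] at this ⊢
    exact congrArg Prod.fst this
  · have hneg : n < 0 := by omega
    rw [PySem.List.pyRange_one_eq_nil (by omega : n ≤ 0)]
    simp
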